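-- pv_equiv track=rewrite | github.com/codeafix/mdlint-obsidian | mdlint_obsidian/rules/formatting.py | _has_unclosed_highlight
-- ===== SOURCE A (Python) =====
-- def _has_unclosed_highlight(line: str) -> bool:
--     """Return True if the line contains an unclosed == highlight marker."""
--     in_highlight = False
--     i = 0
--     n = len(line)
--     while i < n:
--         if line[i] == "\\":
--             i += 2  # skip escaped character
--             continue
--         if line[i : i + 2] == "==":
--             in_highlight = not in_highlight
--             i += 2
--             continue
--         i += 1
--     return in_highlight
-- ===== SOURCE B (Python) =====
-- def _has_unclosed_highlight(line: str) -> bool: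
--     """Return True if the line contains an unclosed == highlight marker."""
--     # One cleaning pass: drop each escaped character (keep the backslash, which
--     # breaks any '==' adjacency exactly like the escape skip), then the answer
--     # is just the parity of the non-overlapping '==' count.
--     cleaned = []
--     skip = False
--     for c in line:
--         if skip:
--             skip = False
--             continue
--         cleaned.append(c)
--         skip = c == "\\"
--     return "".join(cleaned).count("==") % 2 == 1
-- ===== Notes on version B (the rewrite author's own statement) =====
-- stated objective: simpler
-- what changed: Replaces the index-based while loop with slicing and an in-loop boolean toggle state machine by a single cleaning fold (drop each escaped character, keep the backslash) followed by a parity check of the library str.count of the marker.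
import Mathlib
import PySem

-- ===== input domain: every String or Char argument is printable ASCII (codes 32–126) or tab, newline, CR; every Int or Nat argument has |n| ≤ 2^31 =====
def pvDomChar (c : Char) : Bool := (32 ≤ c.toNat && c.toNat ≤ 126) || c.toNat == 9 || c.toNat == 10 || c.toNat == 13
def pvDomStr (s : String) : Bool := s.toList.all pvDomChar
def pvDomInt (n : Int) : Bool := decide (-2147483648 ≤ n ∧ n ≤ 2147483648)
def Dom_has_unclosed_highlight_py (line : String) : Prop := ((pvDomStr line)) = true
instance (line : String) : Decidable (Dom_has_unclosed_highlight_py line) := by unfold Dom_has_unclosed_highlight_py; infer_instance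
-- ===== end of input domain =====

-- B replaces A's index/toggle state machine by a cleaning fold plus a library '==' count parity check (simpler decomposition, same cost).


-- ===== PORT A =====
-- A's while loop over index i, rendered as recursion on the remaining suffix;
-- line[i:i+2] == "==" is the two-element take of the suffix (exact: both require two chars to match).
def pvLoopA : List Char → Bool → Bool
  | [], b => b
  | c :: rest, b =>
      if c = '\\' then pvLoopA rest.tail b            -- i += 2
      else if (c :: rest).take 2 = ['=', '='] then pvLoopA rest.tail (!b)  -- toggle, i += 2
      else pvLoopA rest b                              -- i += 1
termination_by l _ => l.length
decreasing_by all_goals (simp [List.length_tail]; try omega)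

def has_unclosed_highlight_py (line : String) : Bool :=
  pvLoopA line.toList false

-- ===== PORT B =====
-- the for-loop with the skip flag, as a fold over (skip, cleaned)
def pvCleanStep (st : Bool × List Char) (c : Char) : Bool × List Char :=
  if st.1 then (false, st.2)
  else (c = '\\', st.2 ++ [c])

def has_unclosed_highlight_py_alt (line : String) : Bool :=
  let cleaned := (line.toList.foldl pvCleanStep (false, [])).2
  PySem.Str.count (String.ofList cleaned) "==" % 2 == 1

-- ===== PRECONDITION & SPEC =====
def Spec_has_unclosed_highlight_py (line : String) (out : Bool) : Prop := out = has_unclosed_highlight_py_alt line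
instance (line : String) (out : Bool) : Decidable (Spec_has_unclosed_highlight_py line out) := by unfold Spec_has_unclosed_highlight_py; infer_instance

-- ===== CLAIM (what is proved, stated in full; the proofs are below) =====
def Claim_equal_has_unclosed_highlight_py : Prop := ∀ (line : String), Dom_has_unclosed_highlight_py line → Spec_has_unclosed_highlight_py line (has_unclosed_highlight_py line)

-- ===== LEMMAS AND PROOFS =====

-- the cleaned string, computed structurally (escape keeps the backslash, drops the next char)
def pvClean : List Char → List Char
  | [] => []
  | [c] => [c]
  | c :: d :: rest => if c = '\\' then c :: pvClean rest else c :: pvClean (d :: rest)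

-- non-overlapping left-to-right count of "=="
def pvCnt : List Char → Nat
  | [] => 0
  | [_] => 0
  | c :: d :: rest => if c = '=' ∧ d = '=' then pvCnt rest + 1 else pvCnt (d :: rest)

lemma pvCnt_cons_ne {c : Char} (hc : c ≠ '=') (xs : List Char) : pvCnt (c :: xs) = pvCnt xs := by
  cases xs with
  | nil => rfl
  | cons d r => simp [pvCnt, hc]

lemma pv_foldl_skip (l : List Char) (acc : List Char) :
    (List.foldl pvCleanStep (true, acc) l).2 = (List.foldl pvCleanStep (false, acc) l.tail).2 := by
  cases l with
  | nil => rfl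
  | cons c r => simp [List.foldl, pvCleanStep]

lemma pv_foldl_clean (l : List Char) : ∀ acc : List Char,
    (List.foldl pvCleanStep (false, acc) l).2 = acc ++ pvClean l := by
  induction l using pvClean.induct with
  | case1 => intro acc; simp [pvClean]
  | case2 c =>
      intro acc
      by_cases hc : c = '\\' <;>
        simp [List.foldl, pvCleanStep, hc, pvClean]
  | case3 d rest ih =>
      intro acc
      have h1 : List.foldl pvCleanStep (false, acc) ('\\' :: d :: rest)
          = List.foldl pvCleanStep (true, acc ++ ['\\']) (d :: rest) := by
        simp [List.foldl, pvCleanStep]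
      rw [h1, pv_foldl_skip, List.tail_cons, ih]
      simp [pvClean]
  | case4 c d rest hc ih =>
      intro acc
      have h1 : List.foldl pvCleanStep (false, acc) (c :: d :: rest)
          = List.foldl pvCleanStep (false, acc ++ [c]) (d :: rest) := by
        simp [List.foldl, pvCleanStep, hc]
      rw [h1, ih]
      simp [pvClean, hc]

lemma pv_parity_flip (n : Nat) (b : Bool) :
    ((!b) != decide (n % 2 = 1)) = (b != decide ((n + 1) % 2 = 1)) := by
  by_cases hn : n % 2 = 1
  · have h2 : ¬((n + 1) % 2 = 1) := by omega
    simp [hn, h2]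
  · have h2 : (n + 1) % 2 = 1 := by omega
    simp [hn, h2]

lemma pv_loopA_eq (l : List Char) (b : Bool) :
    pvLoopA l b = (b != decide (pvCnt (pvClean l) % 2 = 1)) := by
  induction l, b using pvLoopA.induct with
  | case1 b => simp [pvLoopA, pvClean, pvCnt]
  | case2 rest b ih =>
      rw [pvLoopA]
      rw [ih]
      cases rest with
      | nil => simp [pvClean, pvCnt]
      | cons d r =>
          have hcl : pvClean ('\\' :: d :: r) = '\\' :: pvClean r := by simp [pvClean]
          rw [hcl, List.tail_cons, pvCnt_cons_ne (by decide)]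
          simp
  | case3 c rest b hc hpair ih =>
      rw [pvLoopA]
      simp only [if_neg hc, if_pos hpair]
      rw [ih]
      cases rest with
      | nil => simp [List.take] at hpair
      | cons d r =>
          simp only [List.take, List.cons.injEq] at hpair
          obtain ⟨hce, hde, -⟩ := hpair
          subst hce; subst hde
          have h1 : pvClean ('=' :: '=' :: r) = '=' :: pvClean ('=' :: r) := by
            simp [pvClean]
          have h2 : pvCnt ('=' :: pvClean ('=' :: r)) = pvCnt (pvClean r) + 1 := by
            cases r with
            | nil => simp [pvClean, pvCnt]
            | cons e s =>
                rw [show pvClean ('=' :: e :: s) = '=' :: pvClean (e :: s) by simp [pvClean]]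
                simp [pvCnt]
          rw [List.tail_cons, h1, h2, pv_parity_flip]
  | case4 c rest b hc hpair ih =>
      rw [pvLoopA]
      simp only [if_neg hc, if_neg hpair]
      rw [ih]
      by_cases hce : c = '='
      · -- c = '=' but no pair: rest is [] or starts with a non-'=' character
        subst hce
        cases rest with
        | nil => simp [pvClean, pvCnt]
        | cons d r =>
            have hd : d ≠ '=' := by
              intro hde; subst hde; exact hpair (by simp [List.take])
            have h1 : pvClean ('=' :: d :: r) = '=' :: pvClean (d :: r) := by simp [pvClean]
            have h2 : ∃ t, pvClean (d :: r) = d :: t := by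
              cases r with
              | nil => exact ⟨[], by simp [pvClean]⟩
              | cons e s =>
                  by_cases hdb : d = '\\'
                  · exact ⟨pvClean s, by simp [pvClean, hdb]⟩
                  · exact ⟨pvClean (e :: s), by simp [pvClean, hdb]⟩
            obtain ⟨t, ht⟩ := h2
            rw [h1, ht]
            simp [pvCnt, hd]
      · -- c is an ordinary character
        cases rest with
        | nil => simp [pvClean, pvCnt]
        | cons d r =>
            have h1 : pvClean (c :: d :: r) = c :: pvClean (d :: r) := by simp [pvClean, hc]
            rw [h1, pvCnt_cons_ne hce]

-- PySem's count.go on "==", with enough fuel, computes pvCnt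
lemma pv_go_eq (fuel : Nat) : ∀ (xs : List Char) (acc : Nat), xs.length ≤ fuel →
    PySem.Chars.count.go ['=', '='] fuel xs acc = acc + pvCnt xs := by
  induction fuel with
  | zero =>
      intro xs acc h
      have hx : xs = [] := List.eq_nil_of_length_eq_zero (Nat.le_zero.mp h)
      subst hx
      simp [PySem.Chars.count.go, pvCnt]
  | succ f ih =>
      intro xs acc h
      cases xs with
      | nil => simp [PySem.Chars.count.go, pvCnt]
      | cons c t =>
          rw [PySem.Chars.count.go]
          by_cases hp : List.isPrefixOf ['=', '='] (c :: t) = true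
          · rw [if_pos hp]
            cases t with
            | nil => simp [List.isPrefixOf] at hp
            | cons d r =>
                simp only [List.isPrefixOf, Bool.and_eq_true, beq_iff_eq] at hp
                obtain ⟨hc, hd, -⟩ := hp
                subst hc; subst hd
                have hr : r.length ≤ f := by simp at h; omega
                rw [show List.drop (List.length ['=', '=']) ('=' :: '=' :: r) = r by simp]
                rw [ih r (acc + 1) hr]
                simp [pvCnt]; omega
          · rw [if_neg hp]
            have ht : t.length ≤ f := by simp at h; omega
            rw [ih t acc ht]
            cases t with
            | nil => simp [pvCnt]
            | cons d r =>
                have hne : ¬(c = '=' ∧ d = '=') := by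
                  intro ⟨h1, h2⟩; subst h1; subst h2
                  exact hp (by simp [List.isPrefixOf])
                simp [pvCnt, hne]

lemma pv_count_eq (xs : List Char) : PySem.Chars.count xs ['=', '='] = pvCnt xs := by
  rw [PySem.Chars.count]
  simp only [List.isEmpty_cons, if_neg (by simp : ¬(false = true))]
  simpa using pv_go_eq xs.length xs 0 (le_refl _)

-- ===== VERDICT (by name: the statement is the Claim_ definition above) =====
theorem has_unclosed_highlight_py_spec : Claim_equal_has_unclosed_highlight_py := by
  intro line _
  unfold Spec_has_unclosed_highlight_py has_unclosed_highlight_py has_unclosed_highlight_py_alt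
  show pvLoopA line.toList false
      = (PySem.Str.count (String.ofList ((line.toList.foldl pvCleanStep (false, [])).2)) "==" % 2 == 1)
  rw [pv_loopA_eq line.toList false]
  have hclean := pv_foldl_clean line.toList []
  simp only [List.nil_append] at hclean
  rw [hclean, PySem.Str.count_eq, String.toList_ofList,
    show ("==" : String).toList = ['=', '='] from rfl, pv_count_eq]
  cases h : decide (pvCnt (pvClean line.toList) % 2 = 1) with
  | false =>
      simp only [decide_eq_false_iff_not] at h
      simp [h]
  | true =>
      simp only [decide_eq_true_eq] at h
      simp [h]
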